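-- pv_equiv track=rewrite | github.com/satishchauhan66/azure_migration_tool | azure_migration_tool/gui/utils/compare_keys.py | sample_key_duplicate_stats
-- ===== SOURCE A (Python) =====
-- from collections import Counter
-- from typing import Any, Dict, List, Optional, Sequence, Tuple
--
-- def row_key_tuple(row: dict, key_pairs: List[Tuple[str, str]], side: str) -> tuple:
--     """side: 'src' uses first element of each pair, 'dest' uses second."""
--     if side == "src":
--         return tuple(row.get(sc) for sc, _ in key_pairs)
--     return tuple(row.get(dc) for _, dc in key_pairs)
--
-- def sample_key_duplicate_stats(
--     row_dicts: List[dict],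
--     key_pairs: List[Tuple[str, str]],
--     side: str,
-- ) -> Tuple[bool, int, int, int]:
--     """
--     Detect non-unique comparison keys in a fetched sample.
--
--     Returns:
--         has_duplicates, row_count, unique_key_count, keys_that_have_more_than_one_row
--     """
--     if not row_dicts or not key_pairs:
--         return False, 0, 0, 0
--     keys = [row_key_tuple(r, key_pairs, side) for r in row_dicts]
--     n = len(keys)
--     counter = Counter(keys)
--     unique = len(counter)
--     multi = sum(1 for c in counter.values() if c > 1)
--     return (n > unique), n, unique, multi
-- ===== SOURCE B (Python) =====
-- from typing import List, Tuple
--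
-- def row_key_tuple(row: dict, key_pairs: List[Tuple[str, str]], side: str) -> tuple:
--     """side: 'src' uses first element of each pair, 'dest' uses second."""
--     if side == "src":
--         return tuple(row.get(sc) for sc, _ in key_pairs)
--     return tuple(row.get(dc) for _, dc in key_pairs)
--
-- def sample_key_duplicate_stats(
--     row_dicts: List[dict],
--     key_pairs: List[Tuple[str, str]],
--     side: str,
-- ) -> Tuple[bool, int, int, int]:
--     # Positional scan: no Counter, no sets.  A key is counted as unique at its
--     # FIRST occurrence (not present earlier in the list), and as a multi key if
--     # that first occurrence is followed by another occurrence later on.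
--     if not row_dicts or not key_pairs:
--         return False, 0, 0, 0
--     keys = [row_key_tuple(r, key_pairs, side) for r in row_dicts]
--     n = len(keys)
--     unique = 0
--     multi = 0
--     for i, k in enumerate(keys):
--         if k in keys[:i]:          # not the first occurrence: already counted
--             continue
--         unique += 1
--         if k in keys[i + 1:]:      # first occurrence that repeats later
--             multi += 1
--     return n > unique, n, unique, multi
-- ===== Notes on version B (the rewrite author's own statement) =====
-- stated objective: alternative
-- what changed: Replaces the Counter build plus a second scan over its counts with a positional scan that uses no counting structure at all: each key is classified at its first occurrence by membership tests against the prefix before it (unique) and the suffix after it (duplicated later); trades the hash counter for quadratic membership scans.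
import Mathlib
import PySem

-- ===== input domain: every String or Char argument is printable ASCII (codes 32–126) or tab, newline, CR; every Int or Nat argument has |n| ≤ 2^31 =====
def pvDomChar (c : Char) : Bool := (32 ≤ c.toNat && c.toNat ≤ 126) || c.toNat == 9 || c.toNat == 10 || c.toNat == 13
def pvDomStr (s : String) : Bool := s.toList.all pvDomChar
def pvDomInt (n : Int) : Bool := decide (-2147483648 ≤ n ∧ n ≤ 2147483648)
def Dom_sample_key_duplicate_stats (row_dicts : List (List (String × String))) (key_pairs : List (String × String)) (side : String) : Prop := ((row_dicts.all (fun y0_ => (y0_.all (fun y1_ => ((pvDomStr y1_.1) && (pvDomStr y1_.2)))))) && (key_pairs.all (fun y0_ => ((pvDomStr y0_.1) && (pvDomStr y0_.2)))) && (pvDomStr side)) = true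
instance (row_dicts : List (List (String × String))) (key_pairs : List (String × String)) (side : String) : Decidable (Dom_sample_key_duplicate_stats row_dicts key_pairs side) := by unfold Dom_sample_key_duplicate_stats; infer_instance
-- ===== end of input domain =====

-- B drops A's Counter + second scan over the counts for a positional scan with no
-- counting structure: each key is classified at its first occurrence by membership
-- tests against the prefix before it and the suffix after it (objective: alternative).

-- ===== PORT A =====
-- shared helper: Python row_key_tuple (row.get = Dict.get?; the key tuple is a List (Option String))
def row_key_tuple (row : List (String × String)) (key_pairs : List (String × String)) (side : String) : List (Option String) :=
  if side == "src" then key_pairs.map (fun p => (PySem.Dict.ofList row).get? p.1)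
  else key_pairs.map (fun p => (PySem.Dict.ofList row).get? p.2)

def sample_key_duplicate_stats (row_dicts : List (List (String × String))) (key_pairs : List (String × String)) (side : String) : Bool × Int × Int × Int :=
  if row_dicts.isEmpty || key_pairs.isEmpty then (false, 0, 0, 0)
  else
    let keys := row_dicts.map (fun r => row_key_tuple r key_pairs side)
    let n : Int := PySem.List.len keys
    let counter := PySem.Dict.counter keys
    let unique : Int := (counter.size : Int)
    let multi : Int := PySem.List.len (counter.values.filter (fun c => decide (1 < c)))
    (decide (n > unique), n, unique, multi)

-- ===== PORT B =====
-- Python slices keys[:i] / keys[i+1:] with the nonnegative enumerate index i are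
-- ported as PySem.List.slice (exact there).
def sample_key_duplicate_stats_alt (row_dicts : List (List (String × String))) (key_pairs : List (String × String)) (side : String) : Bool × Int × Int × Int :=
  if row_dicts.isEmpty || key_pairs.isEmpty then (false, 0, 0, 0)
  else
    let keys := row_dicts.map (fun r => row_key_tuple r key_pairs side)
    let n : Int := PySem.List.len keys
    let fin := (PySem.List.enumerate keys).foldl
      (fun (st : Int × Int) ik =>
        if (PySem.List.slice keys none (some ik.1)).contains ik.2 then st
        else (st.1 + 1,
          if (PySem.List.slice keys (some (ik.1 + 1)) none).contains ik.2 then st.2 + 1 else st.2))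
      (0, 0)
    (decide (n > fin.1), n, fin.1, fin.2)

-- ===== PRECONDITION & SPEC =====
def Spec_sample_key_duplicate_stats (row_dicts : List (List (String × String))) (key_pairs : List (String × String)) (side : String) (out : Bool × Int × Int × Int) : Prop := out = sample_key_duplicate_stats_alt row_dicts key_pairs side
instance (row_dicts : List (List (String × String))) (key_pairs : List (String × String)) (side : String) (out : Bool × Int × Int × Int) : Decidable (Spec_sample_key_duplicate_stats row_dicts key_pairs side out) := by unfold Spec_sample_key_duplicate_stats; infer_instance

-- ===== CLAIM (what is proved, stated in full; the proofs are below) =====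
def Claim_equal_sample_key_duplicate_stats : Prop := ∀ (row_dicts : List (List (String × String))) (key_pairs : List (String × String)) (side : String), Dom_sample_key_duplicate_stats row_dicts key_pairs side → Spec_sample_key_duplicate_stats row_dicts key_pairs side (sample_key_duplicate_stats row_dicts key_pairs side)

-- ===== LEMMAS AND PROOFS =====

-- B's loop body, named for the proofs (the whole key list is a parameter)
def pvStep {K : Type} [DecidableEq K] (keys : List K) (st : Int × Int) (ik : Int × K) : Int × Int :=
  if (PySem.List.slice keys none (some ik.1)).contains ik.2 then st
  else (st.1 + 1,
    if (PySem.List.slice keys (some (ik.1 + 1)) none).contains ik.2 then st.2 + 1 else st.2)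

-- loop invariant: scanning 'post' after an already-scanned prefix 'pre' adds to u the
-- number of distinct keys of post not already in pre, and to m the number of distinct
-- keys of post not in pre that occur at least twice in post.
theorem pv_loop_spec {K : Type} [DecidableEq K] :
    ∀ (post pre : List K) (u m : Int),
    (PySem.List.enumerate post (pre.length : Int)).foldl (pvStep (pre ++ post)) (u, m)
    = (u + ((post.toFinset \ pre.toFinset).card : Int),
       m + (((post.toFinset.filter (fun x => x ∉ pre.toFinset ∧ 2 ≤ post.count x)).card : Int)) ) := by
  intro post
  induction post with
  | nil => intro pre u m; simp [PySem.List.enumerate]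
  | cons k rest ih =>
    intro pre u m
    rw [PySem.List.enumerate_cons, List.foldl_cons]
    have htake : PySem.List.slice (pre ++ k :: rest) none (some (pre.length : Int)) = pre := by
      rw [PySem.List.slice_to_natCast]
      simp
    have hdrop : PySem.List.slice (pre ++ k :: rest) (some ((pre.length : Int) + 1)) none = rest := by
      have hc1 : ((pre.length : Int) + 1) = ((pre.length + 1 : Nat) : Int) := by push_cast; ring
      rw [hc1, PySem.List.slice_from_natCast]
      rw [show pre ++ k :: rest = (pre ++ [k]) ++ rest by simp,
        show pre.length + 1 = (pre ++ [k]).length by simp]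
      exact List.drop_left
    have hcons : pre ++ k :: rest = (pre ++ [k]) ++ rest := by simp
    have hlen1 : ((pre.length : Int) + 1) = (((pre ++ [k]).length : Nat) : Int) := by
      simp
    by_cases hk : k ∈ pre
    · -- k already seen in pre: state unchanged
      have hc : (PySem.List.slice (pre ++ k :: rest) none (some (pre.length : Int))).contains k = true := by
        rw [htake]; exact List.contains_iff_mem.mpr hk
      simp only [pvStep, hc, if_pos]
      rw [hlen1, hcons, ih (pre ++ [k]) u m]
      have hpf : (pre ++ [k]).toFinset = pre.toFinset := by
        simp [List.toFinset_append, Finset.union_singleton, Finset.insert_eq_self.mpr (List.mem_toFinset.mpr hk)]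
      have h1 : rest.toFinset \ (pre ++ [k]).toFinset = (k :: rest).toFinset \ pre.toFinset := by
        rw [hpf, List.toFinset_cons, Finset.insert_sdiff_of_mem _ (List.mem_toFinset.mpr hk)]
      have h2 : rest.toFinset.filter (fun x => x ∉ (pre ++ [k]).toFinset ∧ 2 ≤ rest.count x)
          = (k :: rest).toFinset.filter (fun x => x ∉ pre.toFinset ∧ 2 ≤ (k :: rest).count x) := by
        rw [hpf]
        ext x
        by_cases hx : x = k
        · subst hx; simp [Finset.mem_filter, hk]
        · have hkx : k ≠ x := fun h => hx h.symm
          simp [Finset.mem_filter, List.count_cons_of_ne hkx, hx]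
      rw [h1, h2]
    · -- k is a first occurrence
      have hc : (PySem.List.slice (pre ++ k :: rest) none (some (pre.length : Int))).contains k = false := by
        rw [htake]; simp [hk]
      simp only [pvStep, hc, Bool.false_eq_true, if_false, hdrop]
      rw [hlen1, hcons]
      by_cases hkr : k ∈ rest
      · have hcr : rest.contains k = true := List.contains_iff_mem.mpr hkr
        simp only [hcr, if_pos]
        rw [ih (pre ++ [k]) (u + 1) (m + 1)]
        have hpf : (pre ++ [k]).toFinset = insert k pre.toFinset := by
          simp [List.toFinset_append, Finset.union_singleton]
        have hknotin : k ∉ pre.toFinset := fun h => hk (List.mem_toFinset.mp h)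
        have h1 : (1 : Int) + ((rest.toFinset \ (pre ++ [k]).toFinset).card : Int)
            = (((k :: rest).toFinset \ pre.toFinset).card : Int) := by
          rw [hpf, Finset.sdiff_insert, List.toFinset_cons,
            Finset.insert_sdiff_of_notMem _ hknotin]
          have hkm : k ∈ rest.toFinset \ pre.toFinset :=
            Finset.mem_sdiff.mpr ⟨List.mem_toFinset.mpr hkr, hknotin⟩
          rw [Finset.insert_eq_self.mpr hkm, Finset.card_erase_of_mem hkm]
          have hpos := Finset.card_pos.mpr ⟨k, hkm⟩
          omega
        have h2 : (1 : Int) + ((rest.toFinset.filter (fun x => x ∉ (pre ++ [k]).toFinset ∧ 2 ≤ rest.count x)).card : Int)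
            = (((k :: rest).toFinset.filter (fun x => x ∉ pre.toFinset ∧ 2 ≤ (k :: rest).count x)).card : Int) := by
          have hset : (k :: rest).toFinset.filter (fun x => x ∉ pre.toFinset ∧ 2 ≤ (k :: rest).count x)
              = insert k (rest.toFinset.filter (fun x => x ∉ (pre ++ [k]).toFinset ∧ 2 ≤ rest.count x)) := by
            ext x
            by_cases hx : x = k
            · subst hx
              have h1c : 1 ≤ rest.count x := List.count_pos_iff.mpr hkr
              simp [Finset.mem_filter, List.count_cons_self]
              exact ⟨hk, hkr⟩
            · have hkx : k ≠ x := fun h => hx h.symm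
              simp [Finset.mem_filter, List.count_cons_of_ne hkx, hx, hpf]
          rw [hset, Finset.card_insert_of_notMem]
          · push_cast; ring
          · simp [hpf]
        rw [← h1, ← h2]
        simp only [Prod.mk.injEq]
        constructor <;> omega
      · have hcr : rest.contains k = false := by simp [hkr]
        simp only [hcr, Bool.false_eq_true, if_false]
        rw [ih (pre ++ [k]) (u + 1) m]
        have hpf : (pre ++ [k]).toFinset = insert k pre.toFinset := by
          simp [List.toFinset_append, Finset.union_singleton]
        have hknotin : k ∉ pre.toFinset := fun h => hk (List.mem_toFinset.mp h)
        have h1 : (1 : Int) + ((rest.toFinset \ (pre ++ [k]).toFinset).card : Int)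
            = (((k :: rest).toFinset \ pre.toFinset).card : Int) := by
          rw [hpf, Finset.sdiff_insert, List.toFinset_cons,
            Finset.insert_sdiff_of_notMem _ hknotin]
          have hkm : k ∉ rest.toFinset \ pre.toFinset := by
            simp [Finset.mem_sdiff, hkr]
          rw [Finset.erase_eq_of_notMem hkm, Finset.card_insert_of_notMem hkm]
          push_cast; ring
        have h2 : rest.toFinset.filter (fun x => x ∉ (pre ++ [k]).toFinset ∧ 2 ≤ rest.count x)
            = (k :: rest).toFinset.filter (fun x => x ∉ pre.toFinset ∧ 2 ≤ (k :: rest).count x) := by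
          ext x
          by_cases hx : x = k
          · subst hx
            have h0 : rest.count x = 0 := List.count_eq_zero.mpr hkr
            simp [Finset.mem_filter, List.count_cons_self, h0, hkr]
          · have hkx : k ≠ x := fun h => hx h.symm
            simp [Finset.mem_filter, List.count_cons_of_ne hkx, hx, hpf]
        rw [← h1, h2]
        simp only [Prod.mk.injEq]
        exact ⟨by omega, trivial⟩

-- the count over instBEqOfDecidableEq (from pv_loop_spec's DecidableEq) agrees with the canonical count
theorem pv_count_congr {K : Type} [DecidableEq K] [inst : BEq K] [LawfulBEq K] (x : K) :
    ∀ (l : List K), @List.count K instBEqOfDecidableEq x l = @List.count K inst x l := by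
  intro l
  induction l with
  | nil => rfl
  | cons a l ih =>
    rw [@List.count_cons K instBEqOfDecidableEq, @List.count_cons K inst, ih]
    by_cases h : a = x <;> simp [h]

-- ===== VERDICT (by name: the statement is the Claim_ definition above) =====
theorem sample_key_duplicate_stats_spec : Claim_equal_sample_key_duplicate_stats := by
  intro rows kps side _
  unfold Spec_sample_key_duplicate_stats
  by_cases h : rows.isEmpty || kps.isEmpty
  · simp [sample_key_duplicate_stats, sample_key_duplicate_stats_alt, h]
  · set keys := rows.map (fun r => row_key_tuple r kps side) with hkeys
    have hb : (PySem.List.enumerate keys).foldl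
        (fun (st : Int × Int) ik =>
          if (PySem.List.slice keys none (some ik.1)).contains ik.2 then st
          else (st.1 + 1,
            if (PySem.List.slice keys (some (ik.1 + 1)) none).contains ik.2 then st.2 + 1 else st.2))
        (0, 0)
        = (((keys.toFinset \ (([] : List (List (Option String))).toFinset)).card : Int),
           ((keys.toFinset.filter (fun x => x ∉ (([] : List (List (Option String))).toFinset) ∧ 2 ≤ keys.count x)).card : Int)) := by
      have h0 := pv_loop_spec keys ([] : List (List (Option String))) 0 0
      unfold pvStep at h0
      simp only [pv_count_congr] at h0
      simpa using h0
    -- A's unique = card of the distinct-key finset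
    have hu : ((PySem.Dict.counter keys).size : Int) = ((keys.toFinset \ (∅ : Finset (List (Option String)))).card : Int) := by
      have hset : (PySem.Set.ofList keys).toFinset = keys.toFinset := by
        ext x; simp [PySem.Set.mem_ofList]
      rw [Finset.sdiff_empty]
      have : (PySem.Set.ofList keys).length = keys.toFinset.card := by
        rw [← hset, List.toFinset_card_of_nodup (PySem.Set.nodup_ofList keys)]
      simp [PySem.Dict.size, PySem.Dict.items_counter, this]
    -- A's multi = card of the repeated-key finset
    have hm : (PySem.List.len ((PySem.Dict.counter keys).values.filter (fun c => decide (1 < c))) : Int)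
        = ((keys.toFinset.filter (fun x => 2 ≤ keys.count x)).card : Int) := by
      have hv : (PySem.Dict.counter keys).values
          = (PySem.Set.ofList keys).map (fun k => (List.count k keys : Int)) := by
        simp [PySem.Dict.values, PySem.Dict.items_counter, List.map_map]
      have hfl : ((PySem.Dict.counter keys).values.filter (fun c => decide (1 < c))).length
          = ((PySem.Set.ofList keys).filter (fun x => decide (2 ≤ List.count x keys))).length := by
        rw [hv, List.filter_map, List.length_map]
        congr 1
        apply List.filter_congr
        intro x _
        simp only [Function.comp, decide_eq_decide]
        omega
      have hnd : ((PySem.Set.ofList keys).filter (fun x => decide (2 ≤ List.count x keys))).Nodup :=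
        (PySem.Set.nodup_ofList keys).filter _
      have hset : ((PySem.Set.ofList keys).filter (fun x => decide (2 ≤ List.count x keys))).toFinset
          = keys.toFinset.filter (fun x => 2 ≤ keys.count x) := by
        ext x
        simp [PySem.Set.mem_ofList]
      rw [PySem.List.len_eq, hfl, ← List.toFinset_card_of_nodup hnd, hset]
    have hmf : keys.toFinset.filter (fun x => x ∉ (([] : List (List (Option String))).toFinset) ∧ 2 ≤ keys.count x)
        = keys.toFinset.filter (fun x => 2 ≤ keys.count x) := by
      ext x; simp
    simp only [sample_key_duplicate_stats, sample_key_duplicate_stats_alt, h, Bool.false_eq_true,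
      if_false, ← hkeys, hb, hmf]
    rw [hu, hm]
    simp
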